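-- pv_equiv track=rewrite | github.com/ljtijhuis/aoc_2024_py | src/day15.py | execute_moves_widened
-- ===== SOURCE A (Python) =====
-- def execute_moves_widened(field, moves):
--     (row, col) = find_robot(field)
--     for (d_r, d_c) in moves:
--         # print_field(field)
--         moves_to_process = []
--         moves_work = gather_moves(row, col, d_r, d_c, field, moves_to_process)
--         if moves_work:
--             # We might hit a box through multiple different boxes and we only want to move it once so keep track
--             moves_taken = set()
--             while len(moves_to_process) > 0:
--                 move_row, move_col = moves_to_process.pop()
--                 if not (move_row, move_col) in moves_taken:
--                     field[move_row + d_r][move_col + d_c] = field[move_row][move_col]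
--                     field[move_row][move_col] = '.'
--                     moves_taken.add((move_row, move_col))
--             field[row][col] = '.'
--             row += d_r
--             col += d_c
--
--     return field
--
-- def gather_moves(row, col, d_r, d_c, field, moves):
--     if field[row][col] == '.':
--         return True
--     if field[row][col] == '#':
--         return False
--
--     moves.append((row, col))
--     move_works = gather_moves(row + d_r, col + d_c, d_r, d_c, field, moves)
--     if d_r != 0 and field[row][col] == '[':
--         moves.append((row, col+1))
--         return move_works and gather_moves(row + d_r, col + 1 + d_c, d_r, d_c, field, moves)
--     if d_r != 0 and field[row][col] == ']':
--         moves.append((row, col-1))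
--         return move_works and gather_moves(row + d_r, col - 1 + d_c, d_r, d_c, field, moves)
--
--     return move_works
--
-- def find_robot(field):
--     for row, row_list in enumerate(field):
--         for col, value in enumerate(row_list):
--             if value == '@':
--                 return (row, col)
-- ===== SOURCE B (Python) =====
-- # B: iterative re-implementation — the recursive gather_moves is replaced by an explicit
-- # stack of frames inside execute_moves_widened (aborting the whole push as soon as a wall
-- # is seen), producing the affected cells in the same discovery order; the shifts are then
-- # applied over the reversed cell list with a once-only seen set.  Like A, it mutates the
-- # given field in place and returns it.
-- def execute_moves_widened(field, moves):
--     row = col = None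
--     for r, line in enumerate(field):
--         if '@' in line:
--             row, col = r, line.index('@')
--             break
--     for d_r, d_c in moves:
--         # frames: ('E', r, c) = examine the cell, ('P', r, c) = the partner half of a box
--         stack = [('E', row, col)]
--         cells = []
--         ok = True
--         while stack and ok:
--             tag, r, c = stack.pop()
--             if tag == 'E':
--                 v = field[r][c]
--                 if v == '.':
--                     continue
--                 if v == '#':
--                     ok = False
--                     continue
--                 cells.append((r, c))
--                 if d_r != 0 and v == '[':
--                     stack.append(('P', r, c + 1))
--                 elif d_r != 0 and v == ']':
--                     stack.append(('P', r, c - 1))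
--                 stack.append(('E', r + d_r, c + d_c))
--             else:
--                 cells.append((r, c))
--                 stack.append(('E', r + d_r, c + d_c))
--         if ok:
--             seen = set()
--             for r, c in reversed(cells):
--                 if (r, c) not in seen:
--                     seen.add((r, c))
--                     field[r + d_r][c + d_c] = field[r][c]
--                     field[r][c] = '.'
--             field[row][col] = '.'
--             row += d_r
--             col += d_c
--     return field
-- ===== Notes on version B (the rewrite author's own statement) =====
-- stated objective: idiomatic
-- what changed: The recursive gather_moves helper is replaced by an explicit stack of explore/partner frames inside execute_moves_widened that aborts as soon as a wall is seen, and the pop-until-empty application loop becomes a single pass over the reversed collected cells with a once-only seen set; the robot is located with 'in'/index instead of a nested index scan.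
-- outside the precondition, e.g. on execute_moves_widened([['@', '.', '.']], [(0, 1), (0, 1)]): A returns [['.', '.', '@']], B returns [['.', '.', '@']]
import Mathlib
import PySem

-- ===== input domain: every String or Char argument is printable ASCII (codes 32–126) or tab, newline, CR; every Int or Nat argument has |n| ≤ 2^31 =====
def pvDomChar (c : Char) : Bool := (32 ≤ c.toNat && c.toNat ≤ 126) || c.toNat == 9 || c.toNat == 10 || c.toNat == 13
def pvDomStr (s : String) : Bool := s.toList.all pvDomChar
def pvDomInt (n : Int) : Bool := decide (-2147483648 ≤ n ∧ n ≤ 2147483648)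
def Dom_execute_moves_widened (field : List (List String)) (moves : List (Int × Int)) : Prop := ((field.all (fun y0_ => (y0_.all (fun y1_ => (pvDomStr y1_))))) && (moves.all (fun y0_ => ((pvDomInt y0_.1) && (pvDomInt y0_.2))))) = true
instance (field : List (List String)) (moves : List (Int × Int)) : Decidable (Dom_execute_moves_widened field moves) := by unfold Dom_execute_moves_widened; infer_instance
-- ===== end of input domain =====

-- B replaces A's recursive gather_moves by an explicit frame stack inside the move loop
-- (objective: idiomatic/iterative decomposition, no speed claim); like A, the Python B
-- mutates the given field in place — the equivalence proved here is about the return value.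

-- ===== PORT A =====

-- field[r][c] (Python negative-index semantics; none = IndexError, excluded by Pre_)
def getCell (f : List (List String)) (r c : Int) : Option String :=
  match PySem.List.pyGet? f r with
  | none => none
  | some line => PySem.List.pyGet? line c

-- field[r][c] = v (out-of-range would be an IndexError in Python, excluded by Pre_)
def setCell (f : List (List String)) (r c : Int) (v : String) : List (List String) :=
  match PySem.List.pyGet? f r with
  | none => f
  | some line =>
    match PySem.List.pySet? line c v with
    | none => f
    | some line' => PySem.List.pySetD f r line'

-- fuel bound for the gather recursion / stack loop; under Pre_ the walls stop the
-- search well inside this bound (Python's RecursionError case lies outside Pre_)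
def fuelFor (field : List (List String)) : Nat :=
  field.length + (field.map List.length).foldr Nat.max 0 + 2

-- gather_moves, literal: returns (move_works, moves list); fuel 0 = Python recursion blow-up
def gatherA (field : List (List String)) (dr dc : Int) :
    Nat → Int → Int → List (Int × Int) → Bool × List (Int × Int)
  | 0, _, _, acc => (false, acc)
  | Nat.succ f, r, c, acc =>
    match getCell field r c with
    | none => (false, acc)  -- Python raises IndexError here; excluded by Pre_
    | some v =>
      if v = "." then (true, acc)
      else if v = "#" then (false, acc)
      else
        let p1 := gatherA field dr dc f (r + dr) (c + dc) (acc ++ [(r, c)])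
        if dr ≠ 0 ∧ v = "[" then
          if p1.1 then gatherA field dr dc f (r + dr) (c + 1 + dc) (p1.2 ++ [(r, c + 1)])
          else (false, p1.2 ++ [(r, c + 1)])
        else if dr ≠ 0 ∧ v = "]" then
          if p1.1 then gatherA field dr dc f (r + dr) (c - 1 + dc) (p1.2 ++ [(r, c - 1)])
          else (false, p1.2 ++ [(r, c - 1)])
        else p1

-- find_robot, literal: inner column scan then row recursion (None = no '@', excluded by Pre_)
def findColA : List String → Nat → Option Nat
  | [], _ => none
  | v :: rest, c => if v = "@" then some c else findColA rest (c + 1)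

def findRobotA : List (List String) → Nat → Option (Int × Int)
  | [], _ => none
  | line :: rest, r =>
    match findColA line 0 with
    | some c => some ((r : Int), (c : Int))
    | none => findRobotA rest (r + 1)

-- the 'while len(moves_to_process) > 0: … .pop()' loop, popping from the end
def applyA (dr dc : Int) (ms : List (Int × Int)) (taken : PySem.Set (Int × Int))
    (field : List (List String)) : List (List String) :=
  match h : PySem.List.pop? ms with
  | none => field
  | some (m, rest) =>
    if PySem.Set.contains taken m then applyA dr dc rest taken field
    else applyA dr dc rest (PySem.Set.add taken m)
        (setCell (setCell field (m.1 + dr) (m.2 + dc) ((getCell field m.1 m.2).getD "")) m.1 m.2 ".")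
  termination_by ms.length
  decreasing_by
    all_goals
      have hlen : rest.length + 1 = ms.length := PySem.List.length_of_pop?_eq_some ms h
      omega

def stepA (st : List (List String) × Int × Int) (m : Int × Int) :
    List (List String) × Int × Int :=
  let p := gatherA st.1 m.1 m.2 (fuelFor st.1) st.2.1 st.2.2 []
  if p.1 then
    (setCell (applyA m.1 m.2 p.2 PySem.Set.empty st.1) st.2.1 st.2.2 ".",
     st.2.1 + m.1, st.2.2 + m.2)
  else st

def execute_moves_widened (field : List (List String)) (moves : List (Int × Int)) : List (List String) :=
  match findRobotA field 0 with
  | none => field  -- Python raises TypeError (no robot found); excluded by Pre_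
  | some rc => (moves.foldl stepA (field, rc.1, rc.2)).1

-- ===== PORT B =====

-- a stack frame of B's iterative gather: E = examine a cell, P = partner half of a box
-- (the Nat is the loop-guard fuel mirroring Python's recursion limit; a totality device)
inductive PvFrame
  | E : Nat → Int → Int → PvFrame
  | P : Nat → Int → Int → PvFrame
deriving DecidableEq, Repr

def pvFrameMeasure : PvFrame → Nat
  | .E f _ _ => 4 ^ f
  | .P f _ _ => 4 ^ f + 1

def pvStackMeasure (K : List PvFrame) : Nat := (K.map pvFrameMeasure).sum

-- B's 'while stack and ok' loop: returns (ok, cells); aborts with ok = false on a wall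
def gatherB (field : List (List String)) (dr dc : Int) :
    List PvFrame → List (Int × Int) → Bool × List (Int × Int)
  | [], cells => (true, cells)
  | PvFrame.E 0 _ _ :: _, cells => (false, cells)
  | PvFrame.E (f + 1) r c :: K, cells =>
    match getCell field r c with
    | none => (false, cells)  -- Python raises IndexError here; excluded by Pre_
    | some v =>
      if v = "." then gatherB field dr dc K cells
      else if v = "#" then (false, cells)
      else
        if dr ≠ 0 ∧ v = "[" then
          gatherB field dr dc (PvFrame.E f (r + dr) (c + dc) :: PvFrame.P f r (c + 1) :: K) (cells ++ [(r, c)])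
        else if dr ≠ 0 ∧ v = "]" then
          gatherB field dr dc (PvFrame.E f (r + dr) (c + dc) :: PvFrame.P f r (c - 1) :: K) (cells ++ [(r, c)])
        else gatherB field dr dc (PvFrame.E f (r + dr) (c + dc) :: K) (cells ++ [(r, c)])
  | PvFrame.P f r c :: K, cells =>
    gatherB field dr dc (PvFrame.E f (r + dr) (c + dc) :: K) (cells ++ [(r, c)])
  termination_by K _ => pvStackMeasure K
  decreasing_by
    all_goals
      simp [pvStackMeasure, pvFrameMeasure, pow_succ]
    all_goals try omega
    all_goals (have h4 : 1 ≤ 4 ^ f := Nat.one_le_pow _ _ (by omega); omega)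

-- B's 'for (r, c) in reversed(cells)' application loop with the once-only seen set
def applyB (dr dc : Int) : List (Int × Int) → PySem.Set (Int × Int) →
    List (List String) → List (List String)
  | [], _, field => field
  | m :: rest, seen, field =>
    if PySem.Set.contains seen m then applyB dr dc rest seen field
    else applyB dr dc rest (PySem.Set.add seen m)
        (setCell (setCell field (m.1 + dr) (m.2 + dc) ((getCell field m.1 m.2).getD "")) m.1 m.2 ".")

-- B's robot search: first row containing '@', column via line.index('@')
def findRobotB : List (List String) → Nat → Option (Int × Int)
  | [], _ => none
  | line :: rest, r =>
    if line.contains "@" then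
      some ((r : Int), (((PySem.List.index? line "@").getD 0 : Nat) : Int))
    else findRobotB rest (r + 1)

def stepB (st : List (List String) × Int × Int) (m : Int × Int) :
    List (List String) × Int × Int :=
  let p := gatherB st.1 m.1 m.2 [PvFrame.E (fuelFor st.1) st.2.1 st.2.2] []
  if p.1 then
    (setCell (applyB m.1 m.2 p.2.reverse PySem.Set.empty st.1) st.2.1 st.2.2 ".",
     st.2.1 + m.1, st.2.2 + m.2)
  else st

def execute_moves_widened_alt (field : List (List String)) (moves : List (Int × Int)) : List (List String) :=
  match findRobotB field 0 with
  | none => field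
  | some rc => (moves.foldl stepB (field, rc.1, rc.2)).1

-- ===== PRECONDITION & SPEC =====
-- the cell a move would first push into, seen from the first '@' of the field
-- (Python wrap-around indexing; used only by Pre_, not by the ports)
def pvTarget (field : List (List String)) (m : Int × Int) : Option String :=
  (PySem.List.pyGet? field (((field.findIdx (fun line => line.contains "@")) : Int) + m.1)).bind
    (fun l => PySem.List.pyGet? l ((((field.getD (field.findIdx (fun line => line.contains "@")) []).idxOf "@") : Int) + m.2))

-- Pre_ excludes the inputs on which the Python A raises: fields without a robot '@'
-- (find_robot returns None → TypeError) and, when there are moves to execute, moves that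
-- are not unit steps (unless every move is immediately blocked by a wall beside the
-- robot, or there is a single move landing on '.' or '#', where A only touches those
-- cells), rows holding '@' that are not
-- '#'-capped at both ends, and — as soon as some move is vertical — fields that are
-- not '#'-bordered rectangles: outside
-- these the gather recursion can run off the grid (IndexError) or never terminate
-- (RecursionError).  This wall condition is a safe over-approximation: it also excludes
-- some unfenced fields on which A happens to return; the equivalence lemmas below are in
-- fact proved without using Pre_, so A = B on those excluded inputs as well.
def Pre_execute_moves_widened (field : List (List String)) (moves : List (Int × Int)) : Prop :=
  (∃ line ∈ field, "@" ∈ line) ∧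
  (moves = [] ∨
    (∀ m ∈ moves, pvTarget field m = some "#") ∨
    (moves.length = 1 ∧ ∀ m ∈ moves, (pvTarget field m = some "#" ∨ pvTarget field m = some ".")) ∨
    ((∀ m ∈ moves, m = ((1 : Int), (0 : Int)) ∨ m = (-1, 0) ∨ m = (0, 1) ∨ m = (0, -1)) ∧
     (∀ line ∈ field, "@" ∈ line → (line.headD "" = "#" ∧ line.getLast?.getD "" = "#")) ∧
     ((∃ m ∈ moves, m.1 ≠ 0) →
       (2 ≤ field.length ∧
        (∀ line ∈ field, line.length = (field.headD []).length) ∧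
        (∀ line ∈ field, line.headD "" = "#" ∧ line.getLast?.getD "" = "#") ∧
        (∀ v ∈ field.headD [], v = "#") ∧
        (∀ v ∈ field.getLast?.getD [], v = "#")))))
instance (field : List (List String)) (moves : List (Int × Int)) : Decidable (Pre_execute_moves_widened field moves) := by unfold Pre_execute_moves_widened; infer_instance

def pvWitness_execute_moves_widened : List (List String) × (List (Int × Int)) :=
  ([["#", "#", "#", "#", "#", "#", "#", "#"],
    ["#", ".", "[", "]", ".", ".", "O", "#"],
    ["#", ".", ".", "@", "[", "]", ".", "#"],
    ["#", "[", "]", ".", ".", "x", ".", "#"],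
    ["#", ".", ".", ".", "[", "]", ".", "#"],
    ["#", "#", "#", "#", "#", "#", "#", "#"]],
   [(0, 1), (1, 0), (0, -1), (0, 1)])

def Spec_execute_moves_widened (field : List (List String)) (moves : List (Int × Int)) (out : List (List String)) : Prop := out = execute_moves_widened_alt field moves
instance (field : List (List String)) (moves : List (Int × Int)) (out : List (List String)) : Decidable (Spec_execute_moves_widened field moves out) := by unfold Spec_execute_moves_widened; infer_instance

-- ===== CLAIM (what is proved, stated in full; the proofs are below) =====
def Claim_equal_execute_moves_widened : Prop := ∀ (field : List (List String)) (moves : List (Int × Int)), Dom_execute_moves_widened field moves → Pre_execute_moves_widened field moves → Spec_execute_moves_widened field moves (execute_moves_widened field moves)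

-- ===== LEMMAS AND PROOFS =====

-- the two robot searches agree
theorem findColA_map (line : List String) (k : Nat) :
    findColA line k = (PySem.List.index? line "@").map (· + k) := by
  induction line generalizing k with
  | nil => simp [findColA, PySem.List.index?]
  | cons v rest ih =>
    by_cases hv : v = "@"
    · subst hv
      rw [PySem.List.index?_cons_self]
      simp [findColA]
    · rw [PySem.List.index?_cons_of_ne rest hv]
      simp only [findColA, hv, if_false, ih (k + 1), Option.map_map]
      cases PySem.List.index? rest "@" <;> simp <;> omega

theorem findRobot_eq (field : List (List String)) (r : Nat) :
    findRobotA field r = findRobotB field r := by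
  induction field generalizing r with
  | nil => rfl
  | cons line rest ih =>
    simp only [findRobotA, findRobotB, findColA_map line 0]
    by_cases h : "@" ∈ line
    · have hs : (PySem.List.index? line "@").isSome = true :=
        (PySem.List.index?_isSome_iff line "@").mpr h
      obtain ⟨i, hi⟩ := Option.isSome_iff_exists.mp hs
      rw [hi]
      simp only [List.contains_iff_mem.mpr h, if_true, Option.map_some]
      rfl
    · have hn : PySem.List.index? line "@" = none :=
        (PySem.List.index?_eq_none_iff line "@").mpr h
      rw [hn]
      have : line.contains "@" = false := by
        by_contra hc
        simp only [Bool.not_eq_false] at hc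
        exact h (List.contains_iff_mem.mp hc)
      simp only [this, Bool.false_eq_true, if_false, ih, Option.map_none]

-- the stack machine simulates the gather recursion
theorem gather_sim (field : List (List String)) (dr dc : Int) (f : Nat) :
    ∀ (r c : Int) (K : List PvFrame) (cells : List (Int × Int)),
      ((gatherA field dr dc f r c cells).1 = true →
        gatherB field dr dc (PvFrame.E f r c :: K) cells =
          gatherB field dr dc K (gatherA field dr dc f r c cells).2) ∧
      ((gatherA field dr dc f r c cells).1 = false →
        (gatherB field dr dc (PvFrame.E f r c :: K) cells).1 = false) := by
  induction f with
  | zero =>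
    intro r c K cells
    constructor
    · intro h; simp [gatherA] at h
    · intro _; simp [gatherB]
  | succ f ih =>
    intro r c K cells
    cases hv : getCell field r c with
    | none =>
      constructor
      · intro h; simp [gatherA, hv] at h
      · intro _; simp [gatherB, hv]
    | some v =>
      by_cases hdot : v = "."
      · constructor
        · intro _; simp [gatherA, gatherB, hv, hdot]
        · intro h; simp [gatherA, hv, hdot] at h
      · by_cases hwall : v = "#"
        · constructor
          · intro h; simp [gatherA, hv, hdot, hwall] at h
          · intro _; simp [gatherB, hv, hdot, hwall]
        · by_cases hl : dr ≠ 0 ∧ v = "["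
          · -- '[' box half, vertical move
            obtain ⟨hdr, rfl⟩ := hl
            have IH1 := ih (r + dr) (c + dc) (PvFrame.P f r (c + 1) :: K) (cells ++ [(r, c)])
            by_cases hb1 : (gatherA field dr dc f (r + dr) (c + dc) (cells ++ [(r, c)])).1 = true
            · have h1 := IH1.1 hb1
              have IH2 := ih (r + dr) (c + 1 + dc)
                K ((gatherA field dr dc f (r + dr) (c + dc) (cells ++ [(r, c)])).2 ++ [(r, c + 1)])
              constructor
              · intro _
                simp only [gatherA, gatherB, hv, hdr, hb1, reduceIte, ne_eq,
                  not_false_eq_true, true_and, String.reduceEq, if_true, if_false]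
                rw [h1]
                simp only [gatherB]
                by_cases hb2 : (gatherA field dr dc f (r + dr) (c + 1 + dc)
                    ((gatherA field dr dc f (r + dr) (c + dc) (cells ++ [(r, c)])).2 ++ [(r, c + 1)])).1 = true
                · exact IH2.1 hb2
                · -- then A's overall flag is false, contradicting the hypothesis we introduced
                  exfalso
                  rename_i hh
                  simp only [gatherA, hv, hdr, hb1, reduceIte, ne_eq, not_false_eq_true,
                    true_and, String.reduceEq, if_true, if_false] at hh
                  rw [Bool.not_eq_true] at hb2
                  rw [hb2] at hh
                  cases hh
              · intro h
                simp only [gatherA, hv, hdr, hb1, reduceIte, ne_eq, not_false_eq_true,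
                  true_and, String.reduceEq, if_true, if_false] at h
                simp only [gatherB, hv, hdr, reduceIte, ne_eq, not_false_eq_true,
                  true_and, String.reduceEq, if_true, if_false]
                rw [h1]
                simp only [gatherB]
                exact IH2.2 h
            · have hb1' : (gatherA field dr dc f (r + dr) (c + dc) (cells ++ [(r, c)])).1 = false := by
                simpa using hb1
              constructor
              · intro h
                simp only [gatherA, hv, hdr, hb1', reduceIte, ne_eq, not_false_eq_true,
                  true_and, String.reduceEq, if_true, if_false, Bool.false_eq_true] at h
              · intro _
                simp only [gatherB, hv, hdr, reduceIte, ne_eq, not_false_eq_true,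
                  true_and, String.reduceEq, if_true, if_false]
                exact IH1.2 hb1'
          · by_cases hrb : dr ≠ 0 ∧ v = "]"
            · -- ']' box half, vertical move
              obtain ⟨hdr, rfl⟩ := hrb
              have IH1 := ih (r + dr) (c + dc) (PvFrame.P f r (c - 1) :: K) (cells ++ [(r, c)])
              by_cases hb1 : (gatherA field dr dc f (r + dr) (c + dc) (cells ++ [(r, c)])).1 = true
              · have h1 := IH1.1 hb1
                have IH2 := ih (r + dr) (c - 1 + dc)
                  K ((gatherA field dr dc f (r + dr) (c + dc) (cells ++ [(r, c)])).2 ++ [(r, c - 1)])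
                constructor
                · intro _
                  simp only [gatherA, gatherB, hv, hdr, hb1, reduceIte, ne_eq,
                    not_false_eq_true, true_and, String.reduceEq, if_true, if_false]
                  rw [h1]
                  simp only [gatherB]
                  by_cases hb2 : (gatherA field dr dc f (r + dr) (c - 1 + dc)
                      ((gatherA field dr dc f (r + dr) (c + dc) (cells ++ [(r, c)])).2 ++ [(r, c - 1)])).1 = true
                  · exact IH2.1 hb2
                  · exfalso
                    rename_i hh
                    simp only [gatherA, hv, hdr, hb1, reduceIte, ne_eq, not_false_eq_true,
                      true_and, String.reduceEq, if_true, if_false] at hh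
                    rw [Bool.not_eq_true] at hb2
                    rw [hb2] at hh
                    cases hh
                · intro h
                  simp only [gatherA, hv, hdr, hb1, reduceIte, ne_eq, not_false_eq_true,
                    true_and, String.reduceEq, if_true, if_false] at h
                  simp only [gatherB, hv, hdr, reduceIte, ne_eq, not_false_eq_true,
                    true_and, String.reduceEq, if_true, if_false]
                  rw [h1]
                  simp only [gatherB]
                  exact IH2.2 h
              · have hb1' : (gatherA field dr dc f (r + dr) (c + dc) (cells ++ [(r, c)])).1 = false := by
                  simpa using hb1
                constructor
                · intro h
                  simp only [gatherA, hv, hdr, hb1', reduceIte, ne_eq, not_false_eq_true,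
                    true_and, String.reduceEq, if_true, if_false, Bool.false_eq_true] at h
                · intro _
                  simp only [gatherB, hv, hdr, reduceIte, ne_eq, not_false_eq_true,
                    true_and, String.reduceEq, if_true, if_false]
                  exact IH1.2 hb1'
            · -- plain single-cell box
              have IH1 := ih (r + dr) (c + dc) K (cells ++ [(r, c)])
              constructor
              · intro h
                simp only [gatherA, hv, hdot, hwall, hl, hrb, reduceIte, if_true, if_false] at h ⊢
                simp only [gatherB, hv, hdot, hwall, hl, hrb, reduceIte, if_true, if_false]
                exact IH1.1 h
              · intro h
                simp only [gatherA, hv, hdot, hwall, hl, hrb, reduceIte, if_true, if_false] at h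
                simp only [gatherB, hv, hdot, hwall, hl, hrb, reduceIte, if_true, if_false]
                exact IH1.2 h

-- the two application loops agree
theorem apply_eq (dr dc : Int) (ms : List (Int × Int)) :
    ∀ (s : PySem.Set (Int × Int)) (field : List (List String)),
      applyA dr dc ms s field = applyB dr dc ms.reverse s field := by
  induction ms using List.reverseRecOn with
  | nil =>
    intro s field
    rw [applyA.eq_def]
    rfl
  | append_singleton ms m ih =>
    intro s field
    rw [applyA.eq_def]
    split
    · next heq => rw [PySem.List.pop?_last] at heq; cases heq
    · next m' rest heq =>
      rw [PySem.List.pop?_last] at heq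
      simp only [Option.some.injEq, Prod.mk.injEq] at heq
      obtain ⟨h1, h2⟩ := heq
      subst h1; subst h2
      rw [List.reverse_append]
      simp only [List.reverse_cons, List.reverse_nil, List.nil_append, List.singleton_append]
      simp only [applyB]
      split_ifs with hc
      · exact ih s field
      · exact ih _ _

theorem step_eq : stepA = stepB := by
  funext st m
  unfold stepA stepB
  have hs := gather_sim st.1 m.1 m.2 (fuelFor st.1) st.2.1 st.2.2 [] []
  by_cases hb : (gatherA st.1 m.1 m.2 (fuelFor st.1) st.2.1 st.2.2 []).1 = true
  · have h1 := hs.1 hb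
    rw [h1]
    simp only [gatherB, hb, if_true, apply_eq]
  · have hb' : (gatherA st.1 m.1 m.2 (fuelFor st.1) st.2.1 st.2.2 []).1 = false := by
      simpa using hb
    have h2 := hs.2 hb'
    simp only [hb', h2, Bool.false_eq_true, if_false]

-- ===== VERDICT (by name: the statement is the Claim_ definition above) =====
theorem execute_moves_widened_spec : Claim_equal_execute_moves_widened := by
  intro field moves _ _
  unfold Spec_execute_moves_widened
  unfold execute_moves_widened execute_moves_widened_alt
  rw [findRobot_eq, step_eq]
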